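-- pv_equiv track=rewrite | github.com/samuelshlyam/RetailScraper_v4 | classes_and_utility (1).py | remove_letters_from_end
-- ===== SOURCE A (Python) =====
-- def remove_letters_from_end(s):
--     non_letter_index = None
--     for i in range(len(s) - 1, -1, -1):
--         if not s[i].isalpha():
--             non_letter_index = i
--             break
--
--     # If there are no non-letter characters, return an empty string
--     if non_letter_index is None:
--         return ""
--
--     # Return the string up to the last non-letter character
--     return s[:non_letter_index + 1]
-- ===== SOURCE B (Python) =====
-- def remove_letters_from_end(s):
--     keep = 0
--     for i, ch in enumerate(s):
--         if not ch.isalpha():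
--             keep = i + 1
--     return s[:keep]
-- ===== Notes on version B (the rewrite author's own statement) =====
-- stated objective: alternative
-- what changed: B replaces A's backward scan with an early break and None sentinel by a single forward pass that accumulates keep = one past the last non-letter index and returns s[:keep], collapsing the empty/all-letters case into keep=0.
import Mathlib
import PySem

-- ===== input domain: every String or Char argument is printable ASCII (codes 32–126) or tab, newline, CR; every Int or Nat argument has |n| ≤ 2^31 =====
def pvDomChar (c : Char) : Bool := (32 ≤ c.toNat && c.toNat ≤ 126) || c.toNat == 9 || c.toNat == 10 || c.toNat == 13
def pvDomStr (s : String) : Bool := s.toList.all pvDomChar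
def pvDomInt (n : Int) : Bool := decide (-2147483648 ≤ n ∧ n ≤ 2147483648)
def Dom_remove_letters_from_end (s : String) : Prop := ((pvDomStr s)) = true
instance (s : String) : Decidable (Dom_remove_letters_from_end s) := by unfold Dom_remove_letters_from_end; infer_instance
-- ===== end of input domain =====

-- B is a forward single pass accumulating the one-past-last-non-letter index, instead of A's
-- backward scan with an early break and a None sentinel; same cost, different decomposition.

-- ===== PORT A =====
-- the 'for i in range(len(s)-1, -1, -1): if not s[i].isalpha(): break' loop as the obvious
-- countdown recursion: argument n is the number of indices still to visit, current index n-1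
def pvLoopA (l : List Char) : Nat → Option Nat
  | 0 => none
  | n + 1 => if !(PySem.Chars.isalpha (PySem.List.pyGetD l (n : Int) ' ')) then some n else pvLoopA l n

def remove_letters_from_end (s : String) : String :=
  match pvLoopA s.toList s.toList.length with
  | none => ""
  | some i => String.ofList (PySem.List.slice s.toList none (some ((i : Int) + 1)))

-- ===== PORT B =====
def remove_letters_from_end_alt (s : String) : String :=
  String.ofList (PySem.List.slice s.toList none
    (some ((PySem.List.enumerate s.toList 0).foldl
      (fun k p => if !(PySem.Chars.isalpha p.2) then p.1 + 1 else k) 0)))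

-- ===== PRECONDITION & SPEC =====
def Spec_remove_letters_from_end (s : String) (out : String) : Prop := out = remove_letters_from_end_alt s
instance (s : String) (out : String) : Decidable (Spec_remove_letters_from_end s out) := by unfold Spec_remove_letters_from_end; infer_instance

-- ===== CLAIM (what is proved, stated in full; the proofs are below) =====
def Claim_equal_remove_letters_from_end : Prop := ∀ (s : String), Dom_remove_letters_from_end s → Spec_remove_letters_from_end s (remove_letters_from_end s)

-- ===== LEMMAS AND PROOFS =====

-- B's accumulator, as a function of the char list
def pvKeep (l : List Char) : Int :=
  (PySem.List.enumerate l 0).foldl (fun k p => if !(PySem.Chars.isalpha p.2) then p.1 + 1 else k) 0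

-- the countdown loop only reads indices below n, so appending past them changes nothing
lemma pvLoopA_append (l : List Char) (c : Char) (n : Nat) (hn : n ≤ l.length) :
    pvLoopA (l ++ [c]) n = pvLoopA l n := by
  induction n with
  | zero => rfl
  | succ m ih =>
    have hm : (m : Int) < l.length := by exact_mod_cast Nat.lt_of_succ_le hn
    have hg : PySem.List.pyGetD (l ++ [c]) (m : Int) ' ' = PySem.List.pyGetD l (m : Int) ' ' := by
      have hml : m < l.length := by omega
      simp [PySem.List.pyGetD_natCast, List.getD_eq_getElem?_getD,
        List.getElem?_append_left hml]
    simp only [pvLoopA, hg, ih (Nat.le_of_succ_le hn)]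

-- the forward accumulator computes exactly one past the index A's backward search finds
lemma pvKeep_eq_loopA (l : List Char) :
    pvKeep l = match pvLoopA l l.length with | none => 0 | some i => (i : Int) + 1 := by
  induction l using List.reverseRecOn with
  | nil => rfl
  | append_singleton l c ih =>
    have hfold : pvKeep (l ++ [c]) =
        if !(PySem.Chars.isalpha c) then (l.length : Int) + 1 else pvKeep l := by
      simp [pvKeep, PySem.List.enumerate_append, PySem.List.enumerate_cons, List.foldl_append]
    have hget : PySem.List.pyGetD (l ++ [c]) (l.length : Int) ' ' = c := by
      simp [PySem.List.pyGetD_natCast, List.getD_eq_getElem?_getD]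
    have hlen : (l ++ [c]).length = l.length + 1 := by simp
    rw [hfold, hlen]
    simp only [pvLoopA, hget, pvLoopA_append l c l.length le_rfl]
    by_cases h : PySem.Chars.isalpha c
    · simp [h, ih]
    · simp [h]

-- ===== VERDICT (by name: the statement is the Claim_ definition above) =====
theorem remove_letters_from_end_spec : Claim_equal_remove_letters_from_end := by
  intro s _
  unfold Spec_remove_letters_from_end remove_letters_from_end remove_letters_from_end_alt
  have h := pvKeep_eq_loopA s.toList
  simp only [pvKeep] at h
  rw [h]
  cases hl : pvLoopA s.toList s.toList.length with
  | none => simp [PySem.List.slice_to]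
  | some i => simp
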